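-- pv_equiv track=rewrite | github.com/Nghia03092004/nghia03092004.github.io | project_euler/problem_623/solution.py | lambda_mod_recurrence
-- ===== SOURCE A (Python) =====
-- def lambda_mod_recurrence(n: int, mod: int):
--     """Compute [n,2] via recurrence: [n,2] = (n-1)*[n-1,2] + (n-2)!"""
--     if n < 2:
--         return 0
--     stir = 0  # [2,2] = 1 is handled at n=2
--     fact_nm2 = 1  # (n-2)! starting at n=2: 0! = 1
--     stir = 1  # [2,2]
--
--     for m in range(3, n + 1):
--         fact_nm2 = fact_nm2 * (m - 2) % mod  # (m-2)!
--         stir = ((m - 1) * stir + fact_nm2) % mod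
--     return stir if n >= 2 else 0
-- ===== SOURCE B (Python) =====
-- def lambda_mod_recurrence(n: int, mod: int):
--     """Compute [n,2] as the unrolled sum [n,2] = sum_{m=2}^{n} (m-2)! * prod_{j=m}^{n-1} j (mod),
--     via a forward factorial table and a backward suffix-product pass."""
--     if n < 2:
--         return 0
--     if n == 2:
--         return 1
--     # forward pass: fact[k] = k! % mod for k = 0 .. n-2 (fact[0] is the literal 1)
--     fact = [1]
--     for k in range(1, n - 1):
--         fact.append(fact[-1] * k % mod)
--     # backward pass over m = n .. 2, s = prod_{j=m}^{n-1} j (mod), empty at m = n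
--     result = 0
--     s = 1
--     for m in range(n, 1, -1):
--         result = (result + fact[m - 2] * s) % mod
--         s = s * (m - 1) % mod
--     return result
-- ===== Notes on version B (the rewrite author's own statement) =====
-- stated objective: alternative
-- what changed: Replaces the forward Stirling recurrence [m,2]=(m-1)[m-1,2]+(m-2)! by the unrolled sum [n,2]=sum_{m=2}^{n}(m-2)!*prod_{j=m}^{n-1} j, computed as a forward factorial-table pass followed by a backward suffix-product accumulation pass.
import Mathlib
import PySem

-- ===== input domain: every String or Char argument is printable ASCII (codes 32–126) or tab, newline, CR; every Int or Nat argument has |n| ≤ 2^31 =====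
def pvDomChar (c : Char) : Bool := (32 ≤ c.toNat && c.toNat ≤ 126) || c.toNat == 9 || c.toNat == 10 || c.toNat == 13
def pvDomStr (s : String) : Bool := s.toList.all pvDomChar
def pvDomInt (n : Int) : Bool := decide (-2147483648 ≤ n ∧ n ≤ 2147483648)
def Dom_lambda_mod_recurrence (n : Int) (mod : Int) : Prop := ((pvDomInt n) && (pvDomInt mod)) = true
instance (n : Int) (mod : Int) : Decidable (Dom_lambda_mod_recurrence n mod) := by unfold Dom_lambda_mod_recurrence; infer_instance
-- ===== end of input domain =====

-- B replaces the forward Stirling recurrence by the unrolled sum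
-- [n,2] = Σ_{m=2}^{n} (m-2)!·Π_{j=m}^{n-1} j (mod), computed with a forward
-- factorial table and a backward suffix-product pass (alternative decomposition, same cost).

-- ===== PORT A =====
def lambda_mod_recurrence (n : Int) (mod : Int) : Int :=
  if n < 2 then 0
  else
    -- state (fact_nm2, stir), starting at (1, 1) for n = 2
    let st := (PySem.List.pyRange 3 (n + 1) 1).foldl
      (fun (p : Int × Int) m =>
        let f := PySem.Int.mod (p.1 * (m - 2)) mod
        (f, PySem.Int.mod ((m - 1) * p.2 + f) mod)) (1, 1)
    if 2 ≤ n then st.2 else 0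

-- ===== PORT B =====
def lambda_mod_recurrence_alt (n : Int) (mod : Int) : Int :=
  if n < 2 then 0
  else if n = 2 then 1
  else
    -- forward pass: fact[k] = k! % mod (fact[-1] ported literally as pyGetD acc (-1) 0)
    let fact := (PySem.List.pyRange 1 (n - 1) 1).foldl
      (fun (acc : List Int) k => acc ++ [PySem.Int.mod (PySem.List.pyGetD acc (-1) 0 * k) mod]) [1]
    -- backward pass: (result, s); the index m - 2 is always in range, so fact[m-2] is pyGetD
    let st := (PySem.List.pyRange n 1 (-1)).foldl
      (fun (p : Int × Int) m =>
        (PySem.Int.mod (p.1 + PySem.List.pyGetD fact (m - 2) 0 * p.2) mod,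
         PySem.Int.mod (p.2 * (m - 1)) mod)) (0, 1)
    st.1

-- ===== PRECONDITION & SPEC =====
-- Pre_ excludes exactly the inputs where Python A raises ZeroDivisionError (n ≥ 3 with mod = 0);
-- Python B raises there too.
def Pre_lambda_mod_recurrence (n : Int) (mod : Int) : Prop := n ≤ 2 ∨ mod ≠ 0
instance (n : Int) (mod : Int) : Decidable (Pre_lambda_mod_recurrence n mod) := by
  unfold Pre_lambda_mod_recurrence; infer_instance

def pvWitness_lambda_mod_recurrence : Int × Int := (5, 7)

def Spec_lambda_mod_recurrence (n : Int) (mod : Int) (out : Int) : Prop := out = lambda_mod_recurrence_alt n mod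
instance (n : Int) (mod : Int) (out : Int) : Decidable (Spec_lambda_mod_recurrence n mod out) := by unfold Spec_lambda_mod_recurrence; infer_instance

-- ===== CLAIM (what is proved, stated in full; the proofs are below) =====
def Claim_equal_lambda_mod_recurrence : Prop := ∀ (n : Int) (mod : Int), Dom_lambda_mod_recurrence n mod → Pre_lambda_mod_recurrence n mod → Spec_lambda_mod_recurrence n mod (lambda_mod_recurrence n mod)

-- ===== LEMMAS AND PROOFS =====

-- exact (un-modded) factorial k! and Stirling value [k+2, 2]
def pvFactE : Nat → Int
  | 0 => 1
  | k + 1 => pvFactE k * ((k : Int) + 1)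

def pvStirE : Nat → Int
  | 0 => 1
  | k + 1 => ((k : Int) + 2) * pvStirE k + pvFactE (k + 1)

-- the modded factorial chain both programs build (entry 0 is the literal 1)
def pvFl (mod : Int) : Nat → Int
  | 0 => 1
  | k + 1 => PySem.Int.mod (pvFl mod k * ((k : Int) + 1)) mod

-- A's stir state after k loop iterations
def pvStA (mod : Int) : Nat → Int
  | 0 => 1
  | k + 1 => PySem.Int.mod (((k : Int) + 2) * pvStA mod k + pvFl mod (k + 1)) mod

lemma pvMod_modEq (a m : Int) : PySem.Int.mod a m ≡ a [ZMOD m] := by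
  have h := PySem.Int.floordiv_mul_add_mod a m
  refine Int.modEq_iff_dvd.mpr ⟨PySem.Int.floordiv a m, ?_⟩
  linarith [mul_comm (PySem.Int.floordiv a m) m]

lemma pvMod_eq_of_modEq {m x y : Int} (h : x ≡ y [ZMOD m]) :
    PySem.Int.mod x m = PySem.Int.mod y m := by
  rcases eq_or_ne m 0 with hm | hm
  · subst hm
    have hxy : x = y := by simpa [Int.ModEq] using h
    rw [hxy]
  · have hcong : PySem.Int.mod x m ≡ PySem.Int.mod y m [ZMOD m] :=
      (pvMod_modEq x m).trans (h.trans (pvMod_modEq y m).symm)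
    have hd : m ∣ PySem.Int.mod y m - PySem.Int.mod x m := Int.ModEq.dvd hcong
    have hz : PySem.Int.mod y m - PySem.Int.mod x m = 0 := by
      rcases lt_or_gt_of_ne hm with hneg | hpos
      · have b1 := PySem.Int.mod_neg_bounds x hneg
        have b2 := PySem.Int.mod_neg_bounds y hneg
        refine Int.eq_zero_of_abs_lt_dvd ((neg_dvd).mpr hd) ?_
        rw [abs_lt]; omega
      · have b1 := PySem.Int.mod_nonneg x hpos
        have b2 := PySem.Int.mod_nonneg y hpos
        have c1 := PySem.Int.mod_lt x hpos
        have c2 := PySem.Int.mod_lt y hpos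
        refine Int.eq_zero_of_abs_lt_dvd hd ?_
        rw [abs_lt]; omega
    omega

lemma pvFl_modEq (mod : Int) (k : Nat) : pvFl mod k ≡ pvFactE k [ZMOD mod] := by
  induction k with
  | zero => rfl
  | succ k ih =>
    exact (pvMod_modEq _ _).trans (ih.mul_right _)

lemma pvStA_modEq (mod : Int) (k : Nat) : pvStA mod k ≡ pvStirE k [ZMOD mod] := by
  induction k with
  | zero => rfl
  | succ k ih =>
    exact (pvMod_modEq _ _).trans (((Int.ModEq.refl ((k : Int) + 2)).mul ih).add (pvFl_modEq mod (k + 1)))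

lemma pvStA_eq (mod : Int) (k : Nat) :
    pvStA mod (k + 1) = PySem.Int.mod (pvStirE (k + 1)) mod := by
  show PySem.Int.mod (((k : Int) + 2) * pvStA mod k + pvFl mod (k + 1)) mod = _
  exact pvMod_eq_of_modEq
    (((Int.ModEq.refl ((k : Int) + 2)).mul (pvStA_modEq mod k)).add (pvFl_modEq mod (k + 1)))

lemma pvA_fold (mod : Int) (k : Nat) :
    (PySem.List.pyRange 3 (3 + (k : Int)) 1).foldl
      (fun (p : Int × Int) m =>
        let f := PySem.Int.mod (p.1 * (m - 2)) mod
        (f, PySem.Int.mod ((m - 1) * p.2 + f) mod)) (1, 1) = (pvFl mod k, pvStA mod k) := by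
  induction k with
  | zero =>
    rw [show (3 + ((0 : Nat) : Int)) = 3 by simp, PySem.List.pyRange_one_eq_nil (by norm_num)]
    rfl
  | succ k ih =>
    have hc : (3 + ((k + 1 : Nat) : Int)) = (3 + (k : Int)) + 1 := by push_cast; ring
    rw [hc, PySem.List.pyRange_one_succ_right (by omega), List.foldl_append, ih]
    have e1 : (3 + (k : Int)) - 2 = (k : Int) + 1 := by ring
    have e2 : (3 + (k : Int)) - 1 = (k : Int) + 2 := by ring
    simp only [List.foldl, e1, e2]
    show (PySem.Int.mod (pvFl mod k * ((k : Int) + 1)) mod,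
          PySem.Int.mod (((k : Int) + 2) * pvStA mod k + PySem.Int.mod (pvFl mod k * ((k : Int) + 1)) mod) mod)
        = (pvFl mod (k + 1), pvStA mod (k + 1))
    rw [show pvFl mod (k + 1) = PySem.Int.mod (pvFl mod k * ((k : Int) + 1)) mod from rfl]
    rw [show pvStA mod (k + 1) = PySem.Int.mod (((k : Int) + 2) * pvStA mod k + pvFl mod (k + 1)) mod from rfl]
    rfl

lemma pvB_fact (mod : Int) (j : Nat) :
    (PySem.List.pyRange 1 (1 + (j : Int)) 1).foldl
      (fun (acc : List Int) k => acc ++ [PySem.Int.mod (PySem.List.pyGetD acc (-1) 0 * k) mod]) [1]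
      = (List.range (j + 1)).map (pvFl mod) := by
  induction j with
  | zero =>
    rw [show (1 + ((0 : Nat) : Int)) = 1 by simp, PySem.List.pyRange_one_eq_nil (by norm_num)]
    rfl
  | succ j ih =>
    have hc : (1 + ((j + 1 : Nat) : Int)) = (1 + (j : Int)) + 1 := by push_cast; ring
    rw [hc, PySem.List.pyRange_one_succ_right (by omega), List.foldl_append, ih]
    have hlast : PySem.List.pyGetD ((List.range (j + 1)).map (pvFl mod)) (-1) 0 = pvFl mod j := by
      simp [PySem.List.pyGetD, PySem.List.pyGet?, PySem.List.pyIdx?, List.getElem?_map]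
    simp only [List.foldl, hlast]
    rw [show (1 : Int) + (j : Int) = (j : Int) + 1 from by ring]
    rw [List.range_succ (n := j + 1), List.map_append]
    simp [pvFl]
lemma pvB_lookup (mod : Int) (L i : Nat) (h : i < L) :
    PySem.List.pyGetD ((List.range L).map (pvFl mod)) ((i : Nat) : Int) 0 = pvFl mod i := by
  rw [PySem.List.pyGetD_natCast]
  rw [PySem.List.getD_map_range _ _ _ _ h]

lemma pvB_fold (mod : Int) (L : Nat) (k : Nat) (hk : k < L) : ∀ r s : Int,
    ((PySem.List.pyRange (2 + (k : Int)) 1 (-1)).foldl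
      (fun (p : Int × Int) m =>
        (PySem.Int.mod (p.1 + PySem.List.pyGetD ((List.range L).map (pvFl mod)) (m - 2) 0 * p.2) mod,
         PySem.Int.mod (p.2 * (m - 1)) mod)) (r, s)).1
      = PySem.Int.mod (r + s * pvStirE k) mod := by
  induction k with
  | zero =>
    intro r s
    rw [show (2 + ((0 : Nat) : Int)) = 2 by simp,
      PySem.List.pyRange_neg_one_cons (by norm_num),
      show ((2 : Int) - 1) = 1 by norm_num,
      PySem.List.pyRange_neg_one_eq_nil (by norm_num)]
    simp only [List.foldl]
    rw [show ((2 : Int) - 2) = (((0 : Nat) : Nat) : Int) by simp]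
    rw [pvB_lookup mod L 0 hk]
    exact congrArg (fun t => PySem.Int.mod t mod) (by show r + pvFl mod 0 * s = r + s * pvStirE 0; show r + 1 * s = r + s * 1; ring)
  | succ k ih =>
    intro r s
    have hcons : PySem.List.pyRange (2 + ((k + 1 : Nat) : Int)) 1 (-1)
        = (2 + ((k + 1 : Nat) : Int)) :: PySem.List.pyRange (2 + (k : Int)) 1 (-1) := by
      rw [PySem.List.pyRange_neg_one_cons (by push_cast; omega)]
      congr 1
      push_cast; ring
    rw [hcons]
    simp only [List.foldl]
    rw [show (2 + ((k + 1 : Nat) : Int)) - 2 = (((k + 1 : Nat) : Nat) : Int) by push_cast; ring]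
    rw [pvB_lookup mod L (k + 1) hk]
    rw [show (2 + ((k + 1 : Nat) : Int)) - 1 = (k : Int) + 2 by push_cast; ring]
    rw [ih (by omega) _ _]
    refine pvMod_eq_of_modEq ?_
    have h1 : PySem.Int.mod (r + pvFl mod (k + 1) * s) mod ≡ r + pvFactE (k + 1) * s [ZMOD mod] :=
      (pvMod_modEq _ _).trans ((Int.ModEq.refl r).add ((pvFl_modEq mod (k + 1)).mul_right s))
    have h2 : PySem.Int.mod (s * ((k : Int) + 2)) mod * pvStirE k ≡ (s * ((k : Int) + 2)) * pvStirE k [ZMOD mod] :=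
      (pvMod_modEq _ _).mul_right _
    refine (h1.add h2).trans ?_
    have : r + pvFactE (k + 1) * s + s * ((k : Int) + 2) * pvStirE k = r + s * pvStirE (k + 1) := by
      show _ = r + s * (((k : Int) + 2) * pvStirE k + pvFactE (k + 1))
      ring
    rw [this]

-- ===== VERDICT (by name: the statement is the Claim_ definition above) =====
theorem lambda_mod_recurrence_spec : Claim_equal_lambda_mod_recurrence := by
  intro n mod _ _
  unfold Spec_lambda_mod_recurrence lambda_mod_recurrence lambda_mod_recurrence_alt
  by_cases h2 : n < 2
  · simp [h2]
  · by_cases heq : n = 2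
    · subst heq
      norm_num
    · have h3 : 3 ≤ n := by omega
      simp only [if_neg h2, if_neg heq]
      obtain ⟨k, hk⟩ : ∃ k : Nat, n = (k : Int) + 3 := ⟨(n - 3).toNat, by omega⟩
      subst hk
      -- A side
      rw [show ((k : Int) + 3) + 1 = 3 + ((k + 1 : Nat) : Int) by push_cast; ring]
      rw [pvA_fold mod (k + 1)]
      -- B side
      rw [show ((k : Int) + 3) - 1 = 1 + ((k + 1 : Nat) : Int) by push_cast; ring]
      rw [pvB_fact mod (k + 1)]
      rw [show ((k : Int) + 3) = 2 + ((k + 1 : Nat) : Int) by push_cast; ring]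
      rw [pvB_fold mod (k + 2) (k + 1) (by omega) 0 1]
      rw [pvStA_eq mod k]
      rw [if_pos (show (2 : Int) ≤ 2 + ((k + 1 : Nat) : Int) by push_cast; omega)]
      exact congrArg (fun t => PySem.Int.mod t mod) (by ring)
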